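-- pv_equiv track=rewrite | github.com/UomoCaffeLatte/TestBatcher | Batcher/batcher/batcher.py | __Args2Map
-- ===== SOURCE A (Python) =====
-- def __Args2Map(args):
--     # convert list of test args to map format for PPE.
--     map = []
--     for i in range(0, len(args[0])):
--         temp = []
--         for arg in args:
--             temp.append(arg[i])
--         map.append(temp)
--     return map
-- ===== SOURCE B (Python) =====
-- def __Args2Map(args):
--     # convert list of test args to map format for PPE.
--     # B: head/tail peeling -- truncate every row to the width of the first row,
--     # then repeatedly strip off the column of heads until rows are exhausted.
--     n = len(args[0])
--     rows = [row[:n] for row in args]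
--     cols = []
--     while rows and rows[0]:
--         cols.append([row[0] for row in rows])
--         rows = [row[1:] for row in rows]
--     return cols
-- ===== Notes on version B (the rewrite author's own statement) =====
-- stated objective: alternative
-- what changed: B transposes by head/tail peeling: it truncates every row to the first row's width, then repeatedly collects the column of row heads and strips it off, with no index arithmetic, instead of A's index-based gather of each column.
import Mathlib
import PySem

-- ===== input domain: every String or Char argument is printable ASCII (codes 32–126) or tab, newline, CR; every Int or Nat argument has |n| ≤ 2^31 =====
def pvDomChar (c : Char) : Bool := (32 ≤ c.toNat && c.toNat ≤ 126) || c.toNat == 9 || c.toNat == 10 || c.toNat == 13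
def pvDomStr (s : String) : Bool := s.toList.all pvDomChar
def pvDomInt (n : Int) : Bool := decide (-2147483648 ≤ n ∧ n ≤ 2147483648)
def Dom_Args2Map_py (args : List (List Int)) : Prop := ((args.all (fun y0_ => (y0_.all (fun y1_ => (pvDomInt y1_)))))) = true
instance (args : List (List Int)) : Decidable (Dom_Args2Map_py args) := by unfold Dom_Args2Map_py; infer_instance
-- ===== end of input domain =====

-- B transposes by head/tail peeling (truncate rows to the first row's width, then
-- repeatedly strip the column of heads) instead of A's index-based per-column gather.

-- ===== PORT A =====
-- A: for i in range(len(args[0])): gather column i by scanning all rows, append to map.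
def Args2Map_py (args : List (List Int)) : List (List Int) :=
  (PySem.List.pyRange 0 ((args.headD []).length : Int) 1).foldl
    (fun map i =>
      map ++ [args.foldl (fun temp arg => temp ++ [(PySem.List.pyGet? arg i).getD 0]) []])
    []

-- ===== PORT B =====
-- B's while loop: while rows and rows[0]: cols.append([row[0] for row in rows]); rows = [row[1:] for row in rows]
def pvPeelLoop (rows : List (List Int)) (cols : List (List Int)) : List (List Int) :=
  if h : rows ≠ [] ∧ rows.headD [] ≠ [] then
    pvPeelLoop (rows.map (fun r => PySem.List.slice r (some 1) none))
               (cols ++ [rows.map (fun r => (PySem.List.pyGet? r 0).getD 0)])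
  else cols
termination_by (rows.headD []).length
decreasing_by
  obtain ⟨h1, h2⟩ := h
  cases rows with
  | nil => exact absurd rfl h1
  | cons r rs =>
    simp only [List.headD_cons] at h2 ⊢
    simp [PySem.List.slice_from_one]
    cases r with
    | nil => exact absurd rfl h2
    | cons x xs => simp

-- B: n = len(args[0]); rows = [row[:n] for row in args]; peel columns of heads.
def Args2Map_py_alt (args : List (List Int)) : List (List Int) :=
  let n := (args.headD []).length
  pvPeelLoop (args.map (fun row => PySem.List.slice row none (some (n : Int)))) []

-- ===== PRECONDITION & SPEC =====
-- A raises IndexError on empty args (args[0]) and on any row shorter than args[0]; Pre_ excludes exactly those.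
def Pre_Args2Map_py (args : List (List Int)) : Prop :=
  args ≠ [] ∧ ∀ row ∈ args, (args.headD []).length ≤ row.length
instance (args : List (List Int)) : Decidable (Pre_Args2Map_py args) := by
  unfold Pre_Args2Map_py; infer_instance
def pvWitness_Args2Map_py : List (List Int) := [[1, 2], [3, 4]]
def Spec_Args2Map_py (args : List (List Int)) (out : List (List Int)) : Prop := out = Args2Map_py_alt args
instance (args : List (List Int)) (out : List (List Int)) : Decidable (Spec_Args2Map_py args out) := by unfold Spec_Args2Map_py; infer_instance

-- ===== CLAIM =====
def Claim_equal_Args2Map_py : Prop := ∀ (args : List (List Int)), Dom_Args2Map_py args → Pre_Args2Map_py args → Spec_Args2Map_py args (Args2Map_py args)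

-- ===== LEMMAS AND PROOFS =====

-- row element at column i, total form used in A's port
def pvG (arg : List Int) (i : Int) : Int := (PySem.List.pyGet? arg i).getD 0

lemma pvFoldSnoc {α β : Type} (f : α → β) :
    ∀ (l : List α) (acc : List β),
      l.foldl (fun a x => a ++ [f x]) acc = acc ++ l.map f := by
  intro l
  induction l with
  | nil => simp
  | cons x xs ih => intro acc; simp [List.foldl, ih]

-- A's result is the range-n list of gathered columns
lemma pvA_char (args : List (List Int)) :
    Args2Map_py args =
      (List.range (args.headD []).length).map
        (fun k : Nat => args.map (fun arg => pvG arg (k : Int))) := by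
  unfold Args2Map_py
  have hin : ∀ i : Int,
      args.foldl (fun temp arg => temp ++ [(PySem.List.pyGet? arg i).getD 0]) []
        = args.map (fun arg => pvG arg i) := fun i => by
    simpa [pvG] using pvFoldSnoc (fun arg => (PySem.List.pyGet? arg i).getD 0) args []
  simp only [hin]
  rw [pvFoldSnoc (fun i => args.map (fun arg => pvG arg i))]
  rw [PySem.List.pyRange_one]
  simp [List.map_map, Function.comp_def]

-- peeling a nonempty pack of rows of common length m yields the m columns of heads
lemma pvPeel_char :
    ∀ (m : Nat) (rows cols : List (List Int)), rows ≠ [] →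
      (∀ r ∈ rows, r.length = m) →
      pvPeelLoop rows cols
        = cols ++ (List.range m).map (fun k : Nat => rows.map (fun r => pvG r (k : Int))) := by
  intro m
  induction m with
  | zero =>
      intro rows cols hne hlen
      rw [pvPeelLoop]
      have hhead : rows.headD [] = [] := by
        cases rows with
        | nil => rfl
        | cons r rs => exact List.length_eq_zero_iff.mp (hlen r (List.mem_cons_self))
      rw [dif_neg (fun hc => hc.2 hhead)]
      simp
  | succ m ih =>
      intro rows cols hne hlen
      have hhead : rows.headD [] ≠ [] := by
        cases rows with
        | nil => exact absurd rfl hne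
        | cons r rs =>
          simp only [List.headD_cons]
          intro h; subst h
          simpa using hlen [] (List.mem_cons_self)
      have htails : ∀ r ∈ rows.map (fun r => PySem.List.slice r (some 1) none),
          r.length = m := by
        intro t ht
        obtain ⟨r, hr, rfl⟩ := List.mem_map.mp ht
        rw [PySem.List.slice_from_one]
        have := hlen r hr
        simp [List.length_tail, this]
      have hne' : rows.map (fun r => PySem.List.slice r (some 1) none) ≠ [] := by
        simpa using hne
      have hcol : (List.range m).map
            (fun k : Nat => (rows.map (fun r => PySem.List.slice r (some 1) none)).map
              (fun r => pvG r (k : Int)))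
          = (List.range m).map (fun k : Nat => rows.map (fun r => pvG r ((k + 1 : Nat) : Int))) := by
        refine List.map_congr_left ?_
        intro k _
        rw [List.map_map]
        refine List.map_congr_left ?_
        intro r _
        simp only [Function.comp_def, PySem.List.slice_from_one, pvG,
          PySem.List.pyGet?_natCast, List.getElem?_tail]
      have hheads : rows.map (fun r => (PySem.List.pyGet? r 0).getD 0)
          = rows.map (fun r => pvG r ((0 : Nat) : Int)) := by
        simp [pvG]
      rw [pvPeelLoop, dif_pos ⟨hne, hhead⟩, ih _ _ hne' htails, hcol, hheads,
        List.range_succ_eq_map]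
      simp [List.map_map, Function.comp_def]

lemma pvB_char (args : List (List Int)) (hpre : Pre_Args2Map_py args) :
    Args2Map_py_alt args =
      (List.range (args.headD []).length).map
        (fun k : Nat => args.map (fun arg => pvG arg (k : Int))) := by
  obtain ⟨hne, hlen⟩ := hpre
  unfold Args2Map_py_alt
  set n := (args.headD []).length with hn
  have htrunc : ∀ row ∈ args, PySem.List.slice row none (some (n : Int)) = row.take n :=
    fun row _ => PySem.List.slice_to_natCast _ _
  have hlens : ∀ r ∈ args.map (fun row => PySem.List.slice row none (some (n : Int))),
      r.length = n := by
    intro t ht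
    obtain ⟨row, hrow, rfl⟩ := List.mem_map.mp ht
    rw [htrunc row hrow, List.length_take]
    exact min_eq_left (hlen row hrow)
  have hne' : args.map (fun row => PySem.List.slice row none (some (n : Int))) ≠ [] := by
    simpa using hne
  rw [pvPeel_char n _ [] hne' hlens]
  simp only [List.nil_append]
  refine List.map_congr_left ?_
  intro k hk
  rw [List.map_map]
  refine List.map_congr_left ?_
  intro row hrow
  have hk' : k < n := List.mem_range.mp hk
  simp only [Function.comp_def, htrunc row hrow, pvG,
    PySem.List.pyGet?_natCast, List.getElem?_take]
  simp [hk']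

-- ===== VERDICT =====
theorem Args2Map_py_spec : Claim_equal_Args2Map_py := by
  intro args _ hpre
  unfold Spec_Args2Map_py
  rw [pvA_char, pvB_char args hpre]
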